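-- pv_equiv track=rewrite | github.com/Karim-Bouanane/Sliding_puzzle | puzzle.py | get_goal_matrix
-- ===== SOURCE A (Python) =====
-- def get_goal_matrix(size):
--     goal_matrix = []                        # this will be a 2d list that contains the goal matrix
--     for i in range(size):                   # construct rows
--         row = []
--         for j in range(size):               # construct columns
--             row.append((i * size) + j)
--         goal_matrix.append(row)
--
--     return goal_matrix
-- ===== SOURCE B (Python) =====
-- def get_goal_matrix(size):
--     n = max(size, 0)
--     flat = list(range(n * n))
--     return [flat[r * n:(r + 1) * n] for r in range(n)]
-- ===== Notes on version B (the rewrite author's own statement) =====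
-- stated objective: alternative
-- what changed: Builds the full flat sequence 0..size*size-1 once and reshapes it into rows by slicing consecutive size-length chunks, instead of computing each cell with nested i/j loops and (i*size)+j arithmetic.
import Mathlib
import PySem

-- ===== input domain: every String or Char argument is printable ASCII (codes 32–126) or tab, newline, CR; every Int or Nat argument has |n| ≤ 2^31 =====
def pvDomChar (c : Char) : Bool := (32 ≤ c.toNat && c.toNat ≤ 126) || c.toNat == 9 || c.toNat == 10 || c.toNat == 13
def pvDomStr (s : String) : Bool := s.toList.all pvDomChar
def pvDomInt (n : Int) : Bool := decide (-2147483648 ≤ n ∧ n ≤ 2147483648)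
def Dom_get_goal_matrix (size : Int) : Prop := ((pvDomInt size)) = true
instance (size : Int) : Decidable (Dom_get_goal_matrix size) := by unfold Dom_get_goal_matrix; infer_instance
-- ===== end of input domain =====

-- B builds the flat sequence once and slices it into size-length chunks, instead of A's nested i/j loops with (i*size)+j arithmetic; same cost, different decomposition.

-- ===== PORT A =====
def get_goal_matrix (size : Int) : List (List Int) :=
  (PySem.List.pyRange 0 size 1).foldl
    (fun goal_matrix i =>
      goal_matrix ++
        [(PySem.List.pyRange 0 size 1).foldl (fun row j => row ++ [i * size + j]) []])
    []

-- ===== PORT B =====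
def get_goal_matrix_alt (size : Int) : List (List Int) :=
  let n := max size 0
  let flat := PySem.List.pyRange 0 (n * n) 1
  (PySem.List.pyRange 0 n 1).map
    (fun r => PySem.List.slice flat (some (r * n)) (some ((r + 1) * n)))

-- ===== PRECONDITION & SPEC =====
def Spec_get_goal_matrix (size : Int) (out : List (List Int)) : Prop := out = get_goal_matrix_alt size
instance (size : Int) (out : List (List Int)) : Decidable (Spec_get_goal_matrix size out) := by unfold Spec_get_goal_matrix; infer_instance

-- ===== CLAIM (what is proved, stated in full; the proofs are below) =====
def Claim_equal_get_goal_matrix : Prop := ∀ (size : Int), Dom_get_goal_matrix size → Spec_get_goal_matrix size (get_goal_matrix size)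

-- ===== LEMMAS AND PROOFS =====

-- a slice of the flat range is exactly one chunk, written as the shifted range
lemma chunk_eq (size r : Int) (h0 : 0 ≤ r) (h1 : r < size) :
    PySem.List.slice (PySem.List.pyRange 0 (size * size) 1)
      (some (r * size)) (some ((r + 1) * size)) =
    (PySem.List.pyRange 0 size 1).map (fun j => r * size + j) := by
  have hs : 0 < size := lt_of_le_of_lt h0 h1
  have ha : (0 : Int) ≤ r * size := mul_nonneg h0 hs.le
  have hab : r * size ≤ (r + 1) * size := by nlinarith
  have hbN : (r + 1) * size ≤ size * size := by nlinarith
  rw [PySem.List.slice_toNat _ ha (le_trans ha hab)]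
  rw [PySem.List.pyRange_one_append 0 (r * size) (size * size) ha (le_trans hab hbN)]
  rw [show (r * size).toNat = (PySem.List.pyRange 0 (r * size) 1).length by
        rw [PySem.List.length_pyRange_one]; omega,
      List.drop_left]
  rw [PySem.List.pyRange_one_append (r * size) ((r + 1) * size) (size * size) hab hbN]
  rw [show ((r + 1) * size).toNat - (PySem.List.pyRange 0 (r * size) 1).length
        = (PySem.List.pyRange (r * size) ((r + 1) * size) 1).length by
        rw [PySem.List.length_pyRange_one, PySem.List.length_pyRange_one]; omega,
      List.take_left]
  rw [PySem.List.pyRange_one, PySem.List.pyRange_one, List.map_map]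
  have : ((r + 1) * size - r * size).toNat = (size - 0).toNat := by
    congr 1; ring_nf
  rw [this]
  apply List.map_congr_left
  intro k _
  simp

-- ===== VERDICT (by name: the statement is the Claim_ definition above) =====
theorem get_goal_matrix_spec : Claim_equal_get_goal_matrix := by
  intro size _
  unfold Spec_get_goal_matrix get_goal_matrix get_goal_matrix_alt
  by_cases h : 0 < size
  · rw [max_eq_left h.le]
    simp only [PySem.List.foldl_append_singleton_eq_map, List.nil_append]
    apply List.map_congr_left
    intro r hr
    rw [PySem.List.mem_pyRange_one] at hr
    rw [chunk_eq size r hr.1 hr.2]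
  · rw [max_eq_right (by omega : size ≤ 0),
        PySem.List.pyRange_one_eq_nil (by omega : size ≤ 0)]
    simp [PySem.List.pyRange_one_eq_nil (le_refl (0 : Int))]
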